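-- pv_equiv track=rewrite | github.com/sfmalloy/everybody-codes | events/2024/quest08/p3.py | solve
-- ===== SOURCE A (Python) =====
-- def solve(nullpointers: int):
--     acolytes = 10
--     blocks = 202400000
--     thickness = 1
--     width = 1
--     columns = []
--     area = 0
--     while area < blocks:
--         columns.append(0)
--         for c in range(len(columns)):
--             columns[c] += thickness
--         area += thickness * width
--         thickness = ((thickness * nullpointers) % acolytes) + acolytes
--         width += 2
--     width -= 2
--     columns.pop()
--     columns += columns[1:]
--     for c in columns:
--         area -= (nullpointers * width * c) % acolytes
--     return area - blocks
-- ===== SOURCE B (Python) =====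
-- def solve(nullpointers: int):
--     acolytes = 10
--     blocks = 202400000
--     layers = []              # thickness of each layer, oldest first
--     area = 0
--     t = 1
--     k = 0
--     while area < blocks:
--         layers.append(t)
--         area += t * (2 * k + 1)
--         t = t * nullpointers % acolytes + acolytes
--         k += 1
--     w = 2 * k - 1
--     layers.reverse()         # newest layer first
--     # Column c is the suffix sum of thicknesses from layer c on; with the list
--     # reversed these are running prefix sums.  Column 0 is removed once, the
--     # middle columns twice, the last (popped) column never.
--     removed = 0
--     if len(layers) >= 2:
--         s = layers[0]
--         for x in layers[1:-1]:
--             s += x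
--             removed += 2 * (nullpointers * w * s % acolytes)
--         removed += nullpointers * w * (s + layers[-1]) % acolytes
--     return area - removed - blocks
-- ===== Notes on version B (the rewrite author's own statement) =====
-- stated objective: faster
-- what changed: B records each layer's thickness once, reverses the list, and computes the mod-removals over running prefix sums in one backward linear pass, instead of A's per-layer increment of every existing column (quadratic in the number of layers).
import Mathlib
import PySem

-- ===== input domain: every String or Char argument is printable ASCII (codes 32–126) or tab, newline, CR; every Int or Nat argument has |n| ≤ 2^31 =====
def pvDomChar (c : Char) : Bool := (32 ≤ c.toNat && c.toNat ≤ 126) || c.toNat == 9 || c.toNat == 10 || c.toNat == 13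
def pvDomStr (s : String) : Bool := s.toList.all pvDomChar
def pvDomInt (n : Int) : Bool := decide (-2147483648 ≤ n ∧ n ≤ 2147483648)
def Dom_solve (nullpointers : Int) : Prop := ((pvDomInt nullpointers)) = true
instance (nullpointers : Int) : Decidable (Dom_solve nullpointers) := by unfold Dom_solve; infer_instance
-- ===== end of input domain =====

-- B records each layer's thickness once, reverses the list and does one linear
-- backward pass of running prefix sums, replacing A's quadratic per-layer
-- increment of every column; objective: faster. A's list mutation is internal only.

-- ===== PORT A =====
-- thickness update: ((thickness * nullpointers) % acolytes) + acolytes, Python %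
def pvStepT (n t : Int) : Int := PySem.Int.mod (t * n) 10 + 10

-- the while loop of A; `columns.append(0)` then `for c in range(len(columns)): columns[c] += thickness`
-- is the append of 0 followed by adding thickness to every element, i.e. (cols ++ [0]).map (· + t).
-- 1 ≤ t and 1 ≤ w are carried so the loop provably terminates (area strictly grows).
def pvLoopA (n : Int) (cols : List Int) (area t w : Int)
    (ht : 1 ≤ t) (hw : 1 ≤ w) : List Int × Int × Int :=
  if h : area < 202400000 then
    pvLoopA n ((cols ++ [0]).map (· + t)) (area + t * w) (pvStepT n t) (w + 2)
      (le_trans (by omega) (le_add_of_nonneg_left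
        (PySem.Int.mod_nonneg (t * n) (by omega))))
      (by omega)
  else (cols, area, w)
termination_by (202400000 - area).toNat
decreasing_by
  have h1 : (1 : Int) * 1 ≤ t * w := mul_le_mul ht hw (by omega) (by omega)
  omega

def solve (nullpointers : Int) : Int :=
  let r := pvLoopA nullpointers [] 0 1 1 (by omega) (by omega)
  let cols := r.1
  let area := r.2.1
  let w := r.2.2 - 2                         -- width -= 2
  let cols := cols.dropLast                  -- columns.pop(): the loop runs at least once, so nonempty; exact
  let cols2 := cols ++ PySem.List.slice cols (some 1) none   -- columns += columns[1:]
  (cols2.foldl (fun a c => a - PySem.Int.mod (nullpointers * w * c) 10) area) - 202400000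

-- ===== PORT B =====
-- B's while loop: records the layer thicknesses (oldest first) and the layer
-- count k (width = 2*k+1); never touches the columns.
def pvLayersB (n : Int) (ls : List Int) (area t k : Int)
    (ht : 1 ≤ t) (hk : 0 ≤ k) : List Int × Int × Int :=
  if h : area < 202400000 then
    pvLayersB n (ls ++ [t]) (area + t * (2 * k + 1))
      (PySem.Int.mod (t * n) 10 + 10) (k + 1)
      (le_trans (by omega) (le_add_of_nonneg_left
        (PySem.Int.mod_nonneg (t * n) (by omega))))
      (by omega)
  else (ls, area, k)
termination_by (202400000 - area).toNat
decreasing_by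
  have h1 : (1 : Int) * 1 ≤ t * (2 * k + 1) := mul_le_mul ht (by omega) (by omega) (by omega)
  omega

def solve_alt (nullpointers : Int) : Int :=
  let r := pvLayersB nullpointers [] 0 1 0 (by omega) (by omega)
  let area := r.2.1
  let w := 2 * r.2.2 - 1
  let rts := r.1.reverse                     -- layers.reverse(): newest first
  let removed : Int :=
    if 2 ≤ rts.length then
      -- s starts at layers[0]; loop over layers[1:-1]; indexing exact under the length guard
      let st := (PySem.List.slice rts (some 1) (some (-1))).foldl
        (fun (st : Int × Int) x =>
          (st.1 + 2 * PySem.Int.mod (nullpointers * w * (st.2 + x)) 10, st.2 + x))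
        (0, (PySem.List.pyGet? rts 0).getD 0)
      st.1 + PySem.Int.mod (nullpointers * w * (st.2 + (PySem.List.pyGet? rts (-1)).getD 0)) 10
    else 0
  area - removed - 202400000

-- ===== PRECONDITION & SPEC =====
def Spec_solve (nullpointers : Int) (out : Int) : Prop := out = solve_alt nullpointers
instance (nullpointers : Int) (out : Int) : Decidable (Spec_solve nullpointers out) := by unfold Spec_solve; infer_instance

-- ===== CLAIM (what is proved, stated in full; the proofs are below) =====
def Claim_equal_solve : Prop := ∀ (nullpointers : Int), Dom_solve nullpointers → Spec_solve nullpointers (solve nullpointers)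

-- ===== LEMMAS AND PROOFS =====

-- columns as suffix sums of the thickness list (oldest first)
def pvColsOf : List Int → List Int
  | [] => []
  | x :: r => (x + r.sum) :: pvColsOf r

-- running prefix sums starting from s
def pvPre : List Int → Int → List Int
  | [], _ => []
  | x :: r, s => (s + x) :: pvPre r (s + x)

theorem pvColsOf_snoc (ts : List Int) (t : Int) :
    pvColsOf (ts ++ [t]) = (pvColsOf ts ++ [0]).map (· + t) := by
  induction ts with
  | nil => simp [pvColsOf]
  | cons x r ih => simp [pvColsOf, ih]; ring

-- A's loop and B's loop run in lockstep: A's columns are the suffix sums of B's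
-- thickness list and A's width is 2*k+1.
theorem pvLoop_eq (n : Int) (ls : List Int) (area t k : Int)
    (ht : 1 ≤ t) (hk : 0 ≤ k) : ∀ (w : Int) (hw2 : w = 2 * k + 1) (hw : 1 ≤ w),
    pvLoopA n (pvColsOf ls) area t w ht hw =
      (pvColsOf (pvLayersB n ls area t k ht hk).1,
       (pvLayersB n ls area t k ht hk).2.1,
       2 * (pvLayersB n ls area t k ht hk).2.2 + 1) := by
  fun_induction pvLayersB n ls area t k ht hk with
  | case1 ls area t k ht hk h ih =>
      intro w hw2 hw
      rw [pvLoopA]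
      simp only [h, dite_true]
      rw [← pvColsOf_snoc]
      subst hw2
      exact ih (2 * k + 1 + 2) (by ring) _
  | case2 ls area t k ht hk h =>
      intro w hw2 hw
      rw [pvLoopA]
      simp [h, hw2]

theorem pvFoldl_sub (f : Int → Int) (l : List Int) (a : Int) :
    l.foldl (fun a c => a - f c) a = a - (l.map f).sum := by
  induction l generalizing a with
  | nil => simp
  | cons x r ih => simp [ih, sub_sub]

theorem pvSlice_one_neg_one (xs : List Int) :
    PySem.List.slice xs (some 1) (some (-1)) = (xs.drop 1).dropLast := by
  simp [PySem.List.slice, PySem.List.clampIdx]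
  rcases xs with _ | ⟨x, r⟩
  · simp
  · simp [List.dropLast_eq_take]

theorem pvSlice_from_one (xs : List Int) :
    PySem.List.slice xs (some 1) none = xs.drop 1 := by
  simp [PySem.List.slice, PySem.List.clampIdx]
  rcases xs with _ | ⟨x, r⟩ <;> simp

theorem pvPre_snoc (l : List Int) (x s : Int) :
    pvPre (l ++ [x]) s = pvPre l s ++ [s + l.sum + x] := by
  induction l generalizing s with
  | nil => simp [pvPre]
  | cons y r ih => simp [pvPre, ih]; ring_nf

theorem pvColsOf_eq_pre (ts : List Int) :
    pvColsOf ts = (pvPre ts.reverse 0).reverse := by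
  induction ts with
  | nil => simp [pvColsOf, pvPre]
  | cons x r ih =>
      simp only [pvColsOf, List.reverse_cons, pvPre_snoc, List.reverse_append,
        ih]
      simp
      ring

theorem pvPre_split (l : List Int) (s : Int) (h : l ≠ []) :
    pvPre l s = pvPre l.dropLast s ++ [s + l.sum] := by
  induction l generalizing s with
  | nil => exact absurd rfl h
  | cons x r ih =>
      rcases r with _ | ⟨y, r2⟩
      · simp [pvPre]
      · conv_lhs => rw [show pvPre (x :: y :: r2) s = (s + x) :: pvPre (y :: r2) (s + x) from rfl]
        rw [ih (s + x) (by simp), List.dropLast_cons₂]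
        simp only [pvPre, List.cons_append, List.sum_cons, List.cons.injEq, true_and,
          List.append_cancel_left_eq, List.cons.injEq, and_true]
        ring

theorem pvRev_dropLast (l : List Int) : l.reverse.dropLast = l.tail.reverse := by
  induction l with
  | nil => rfl
  | cons x r ih =>
      rcases r with _ | ⟨y, r2⟩
      · simp
      · simp [List.dropLast_concat]

-- B's prefix-sum loop: the running values are pvPre mid s0
theorem pvBloop (f : Int → Int) (mid : List Int) : ∀ (a s0 : Int),
    mid.foldl (fun (st : Int × Int) x => (st.1 + 2 * f (st.2 + x), st.2 + x)) (a, s0)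
      = (a + 2 * ((pvPre mid s0).map f).sum, s0 + mid.sum) := by
  induction mid with
  | nil => intro a s0; simp [pvPre]
  | cons x r ih =>
      intro a s0
      simp only [List.foldl_cons, ih, pvPre, List.map_cons, List.sum_cons, Prod.mk.injEq]
      constructor <;> ring

-- the whole post-processing agrees
theorem pvPost_eq (n w area : Int) (ts : List Int) :
    ((((pvColsOf ts).dropLast ++
        PySem.List.slice (pvColsOf ts).dropLast (some 1) none).foldl
        (fun a c => a - PySem.Int.mod (n * w * c) 10) area) - 202400000)
    =
    (let rts := ts.reverse
     let removed : Int :=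
       if 2 ≤ rts.length then
         let st := (PySem.List.slice rts (some 1) (some (-1))).foldl
           (fun (st : Int × Int) x =>
             (st.1 + 2 * PySem.Int.mod (n * w * (st.2 + x)) 10, st.2 + x))
           (0, (PySem.List.pyGet? rts 0).getD 0)
         st.1 + PySem.Int.mod (n * w * (st.2 + (PySem.List.pyGet? rts (-1)).getD 0)) 10
       else 0
     area - removed - 202400000) := by
  set f : Int → Int := fun c => PySem.Int.mod (n * w * c) 10 with hf
  simp only [pvSlice_from_one, pvSlice_one_neg_one, pvFoldl_sub,
    List.map_append, List.sum_append]
  rcases hrev : ts.reverse with _ | ⟨x, r⟩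
  · have : ts = [] := by
      have := congrArg List.reverse hrev; simpa using this
    subst this; simp [pvColsOf]
  · have hts : ts = (x :: r).reverse := by
      have := congrArg List.reverse hrev; simpa using this
    subst hts
    rcases r with _ | ⟨y, r2⟩
    · simp [pvColsOf]
    · have hlen : 2 ≤ ((x :: y :: r2 : List Int)).length := by simp
      rw [if_pos (by simpa using hlen)]
      have hcols : pvColsOf (x :: y :: r2 : List Int).reverse
          = (pvPre (x :: y :: r2) 0).reverse := by
        rw [pvColsOf_eq_pre]; simp
      -- q := pvPre (y :: r2) x  (the tail of the prefix sums)
      have hpre0 : pvPre (x :: y :: r2 : List Int) 0 = (0 + x) :: pvPre (y :: r2) (0 + x) := rfl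
      set q : List Int := pvPre (y :: r2) x with hq
      have hpre0' : pvPre (x :: y :: r2 : List Int) 0 = x :: q := by
        rw [hpre0]; simp [hq]
      have hcols' : (pvColsOf (x :: y :: r2 : List Int).reverse).dropLast = q.reverse := by
        rw [hcols, hpre0', pvRev_dropLast]; simp
      have hqsplit : q = pvPre (y :: r2 : List Int).dropLast x ++ [x + (y :: r2 : List Int).sum] :=
        pvPre_split _ _ (by simp)
      -- A side sums over q and q.dropLast
      rw [hcols']
      have hdrop1 : (q.reverse.drop 1) = q.dropLast.reverse := by
        have h2 := pvRev_dropLast q.reverse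
        simp only [List.reverse_reverse] at h2
        rw [List.drop_one, h2, List.reverse_reverse]
      rw [hdrop1]
      -- B side
      simp only [List.tail_cons, List.drop_one]
      have hget0 : (PySem.List.pyGet? (x :: y :: r2 : List Int) 0).getD 0 = x := by
        simp [PySem.List.pyGet?_zero_cons]
      have hgetl : (PySem.List.pyGet? (x :: y :: r2 : List Int) (-1)).getD 0
          = (y :: r2 : List Int).getLast (by simp) := by
        rw [PySem.List.pyGet?_neg_one]
        simp [List.getLast?_eq_getLast]
      rw [hget0, hgetl]
      have hb := pvBloop (fun c => PySem.Int.mod (n * w * c) 10) (y :: r2 : List Int).dropLast 0 x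
      simp only [] at hb
      rw [hb]
      have hdl : q.dropLast = pvPre (y :: r2 : List Int).dropLast x := by
        rw [hqsplit]; simp
      have hlast : x + (y :: r2 : List Int).dropLast.sum + (y :: r2 : List Int).getLast (by simp)
          = x + (y :: r2 : List Int).sum := by
        have := List.dropLast_append_getLast (l := (y :: r2 : List Int)) (by simp)
        have hs := congrArg List.sum this
        rw [List.sum_append] at hs
        simp only [List.sum_cons, List.sum_nil, add_zero] at hs ⊢
        omega
      have hqsum : (q.map f).sum = ((q.dropLast).map f).sum + f (x + (y :: r2 : List Int).sum) := by
        conv_lhs => rw [hqsplit]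
        rw [hdl]
        simp [List.sum_append]
      simp only [List.map_reverse, List.sum_reverse]
      rw [hqsum, hdl, hlast]
      ring
  
-- ===== VERDICT (by name: the statement is the Claim_ definition above) =====
theorem solve_spec : Claim_equal_solve := by
  intro n _
  unfold Spec_solve solve solve_alt
  have h := pvLoop_eq n [] 0 1 0 (by omega) (by omega) 1 (by ring) (by omega)
  simp only [pvColsOf] at h
  dsimp only
  rw [h]
  dsimp only
  have hw : 2 * (pvLayersB n [] 0 1 0 (by omega) (by omega)).2.2 + 1 - 2
      = 2 * (pvLayersB n [] 0 1 0 (by omega) (by omega)).2.2 - 1 := by omega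
  rw [hw]
  exact pvPost_eq n _ _ _
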